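-- pv_equiv track=rewrite | github.com/sajal-madan-ds/text-normalization-streamlit | num2words_tts.py | _normalize_alphanumeric_id
-- ===== SOURCE A (Python) =====
-- from typing import Dict, List, Any, Tuple
--
-- def _normalize_alphanumeric_id(text: str) -> Dict[str, Any]:
--     """
--     Normalize compact alphanumeric IDs like 'bfrs12345' so that letters are kept
--     as prefix and digits can be read digit-by-digit by the converter.
--     """
--     digits = ''.join(ch for ch in text if ch.isdigit())
--     prefix = ''.join(ch for ch in text if not ch.isdigit()).strip()
--     return {
--         'type': 'alphanumeric_id',
--         'digits': digits,
--         'prefix': prefix,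
--         'text': text,
--     }
-- ===== SOURCE B (Python) =====
-- def _normalize_alphanumeric_id(text: str):
--     # Segment the text into maximal runs of digits / non-digits, then join runs per class.
--     runs = []
--     rest = text
--     while rest:
--         is_d = rest[0].isdigit()
--         k = 1
--         while k < len(rest) and rest[k].isdigit() == is_d:
--             k += 1
--         runs.append((is_d, rest[:k]))
--         rest = rest[k:]
--     digits = ''.join(s for d, s in runs if d)
--     prefix = ''.join(s for d, s in runs if not d).strip()
--     return {
--         'type': 'alphanumeric_id',
--         'digits': digits,
--         'prefix': prefix,
--         'text': text,
--     }
-- ===== Notes on version B (the rewrite author's own statement) =====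
-- stated objective: alternative
-- what changed: B segments the text into maximal digit/non-digit runs with an index-and-slice scanner and then joins runs per class, instead of A's two per-character filtering comprehensions.
import Mathlib
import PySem

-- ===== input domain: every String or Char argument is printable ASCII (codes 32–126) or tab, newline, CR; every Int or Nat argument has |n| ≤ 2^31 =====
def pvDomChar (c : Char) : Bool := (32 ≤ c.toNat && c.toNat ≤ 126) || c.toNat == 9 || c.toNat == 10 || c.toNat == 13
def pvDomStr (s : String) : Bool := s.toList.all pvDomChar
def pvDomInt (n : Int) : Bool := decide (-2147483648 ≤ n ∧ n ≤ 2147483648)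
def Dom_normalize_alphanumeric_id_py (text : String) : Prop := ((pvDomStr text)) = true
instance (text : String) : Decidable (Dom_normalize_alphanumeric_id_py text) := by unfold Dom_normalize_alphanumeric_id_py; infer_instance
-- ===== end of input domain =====

-- B replaces A's two per-character filtering passes by a maximal-run segmentation of the text,
-- joining the digit runs and the non-digit runs per class (objective: alternative decomposition).

-- ===== PORT A =====
-- digits = ''.join(ch for ch in text if ch.isdigit());
-- prefix = ''.join(ch for ch in text if not ch.isdigit()).strip()
def normalize_alphanumeric_id_py (text : String) : List (String × String) :=
  let digits := String.ofList (text.toList.filter (fun ch => PySem.Chars.isdigit ch))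
  let pfx := String.ofList (PySem.Chars.strip (text.toList.filter (fun ch => !PySem.Chars.isdigit ch)))
  [("type", "alphanumeric_id"), ("digits", digits), ("prefix", pfx), ("text", text)]

-- ===== PORT B =====
-- inner while loop: k = 1; while k < len(rest) and rest[k].isdigit() == is_d: k += 1
-- here rendered over rest[1:]: pvRunLen counts the matching extension, so k = 1 + pvRunLen is_d rest[1:]
def pvRunLen (b : Bool) : List Char → Nat
  | [] => 0
  | c :: r => if PySem.Chars.isdigit c == b then pvRunLen b r + 1 else 0

-- outer while loop: runs.append((is_d, rest[:k])); rest = rest[k:]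
def pvRuns : List Char → List (Bool × List Char)
  | [] => []
  | c :: r =>
    let b := PySem.Chars.isdigit c
    let k := pvRunLen b r
    (b, c :: r.take k) :: pvRuns (r.drop k)
termination_by l => l.length
decreasing_by simp

-- digits = ''.join(s for d, s in runs if d); prefix = ''.join(s for d, s in runs if not d).strip()
def normalize_alphanumeric_id_py_alt (text : String) : List (String × String) :=
  let runs := pvRuns text.toList
  let digits := String.ofList (((runs.filter (fun r => r.1)).map Prod.snd).flatten)
  let pfx := String.ofList (PySem.Chars.strip (((runs.filter (fun r => !r.1)).map Prod.snd).flatten))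
  [("type", "alphanumeric_id"), ("digits", digits), ("prefix", pfx), ("text", text)]

-- ===== PRECONDITION & SPEC =====
def Spec_normalize_alphanumeric_id_py (text : String) (out : List (String × String)) : Prop := out = normalize_alphanumeric_id_py_alt text
instance (text : String) (out : List (String × String)) : Decidable (Spec_normalize_alphanumeric_id_py text out) := by unfold Spec_normalize_alphanumeric_id_py; infer_instance

-- ===== CLAIM (what is proved, stated in full; the proofs are below) =====
def Claim_equal_normalize_alphanumeric_id_py : Prop := ∀ (text : String), Dom_normalize_alphanumeric_id_py text → Spec_normalize_alphanumeric_id_py text (normalize_alphanumeric_id_py text)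

-- ===== LEMMAS AND PROOFS =====
lemma pvRunLen_take (b : Bool) (r : List Char) :
    r.take (pvRunLen b r) = r.takeWhile (fun d => PySem.Chars.isdigit d == b) := by
  induction r with
  | nil => simp [pvRunLen]
  | cons c r ih =>
    by_cases h : PySem.Chars.isdigit c = b
    · simp [pvRunLen, List.takeWhile, h, ih]
    · have hb : (PySem.Chars.isdigit c == b) = false := by simp [h]
      simp [pvRunLen, List.takeWhile, hb]

lemma filter_takeWhile_eq (q b : Bool) (r : List Char) :
    (r.takeWhile (fun d => PySem.Chars.isdigit d == b)).filter
        (fun d => PySem.Chars.isdigit d == q) =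
      if b = q then r.takeWhile (fun d => PySem.Chars.isdigit d == b) else [] := by
  by_cases h : b = q
  · subst h
    rw [if_pos rfl]
    exact List.filter_eq_self.mpr (fun c hc => List.mem_takeWhile_imp (l := r) (p := fun d => PySem.Chars.isdigit d == b) hc)
  · simp only [if_neg h]
    refine List.filter_eq_nil_iff.mpr (fun c hc => ?_)
    have hc' : (PySem.Chars.isdigit c == b) = true :=
      List.mem_takeWhile_imp (l := r) (p := fun d => PySem.Chars.isdigit d == b) hc
    simp only [beq_iff_eq] at hc' ⊢
    exact fun hq => h (hc' ▸ hq)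

lemma pvRuns_flatten (q : Bool) (l : List Char) :
    (((pvRuns l).filter (fun r => r.1 == q)).map Prod.snd).flatten =
      l.filter (fun d => PySem.Chars.isdigit d == q) := by
  induction l using pvRuns.induct with
  | case1 => simp [pvRuns]
  | case2 c r b k ih =>
    rw [pvRuns]
    have hsplit : c :: r =
        (c :: r.take (pvRunLen (PySem.Chars.isdigit c) r)) ++
          r.drop (pvRunLen (PySem.Chars.isdigit c) r) := by
      simp
    conv_rhs => rw [hsplit]
    rw [List.filter_append, List.filter_cons]
    subst b; subst k
    rw [pvRunLen_take]
    by_cases h : PySem.Chars.isdigit c = q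
    · have hb : (PySem.Chars.isdigit c == q) = true := by simp [h]
      simp only [List.filter_cons, hb, if_pos, List.map_cons, List.flatten_cons, ih,
        filter_takeWhile_eq q (PySem.Chars.isdigit c) r, if_pos h]
    · have hb : (PySem.Chars.isdigit c == q) = false := by simp [h]
      simp only [List.filter_cons, hb, List.map, ih,
        filter_takeWhile_eq q (PySem.Chars.isdigit c) r, if_neg h]
      simp [ih]

-- ===== VERDICT (by name: the statement is the Claim_ definition above) =====
theorem normalize_alphanumeric_id_py_spec : Claim_equal_normalize_alphanumeric_id_py := by
  intro text _
  unfold Spec_normalize_alphanumeric_id_py normalize_alphanumeric_id_py normalize_alphanumeric_id_py_alt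
  have h1 := pvRuns_flatten true text.toList
  have h2 := pvRuns_flatten false text.toList
  simp only [beq_true, beq_false] at h1 h2
  rw [← h1, ← h2]
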